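-- pv_equiv track=rewrite | github.com/Prithvi824/Leet-code | Easy/Python/1566. Detect Pattern of Length M Repeated K or More Times.py | check
-- ===== SOURCE A (Python) =====
-- def check(arr, size, length):
--     if size * length > len(arr):
--         return False
--
--     const = arr[0:size]
--
--     for i in range(size,len(arr),size):
--         if arr[i: i+size] != const:
--             return False
--
--     return True
-- ===== SOURCE B (Python) =====
-- def check(arr, size, length):
--     if size * length > len(arr):
--         return False
--     return arr == arr[0:size] * (len(arr) // size)
-- ===== Notes on version B (the rewrite author's own statement) =====
-- stated objective: simpler
-- what changed: B replaces the block-by-block slice-comparison loop with one expression that builds the expected repetition arr[0:size]*(len(arr)//size) and compares it to arr once.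
-- intended difference: On degenerate inputs where arr is nonempty, size exceeds len(arr) yet size*length <= len(arr) (only possible for length <= 0), A's loop runs zero times so A vacuously returns True, while B returns False, the intended verdict since no block of size elements fits into arr. — e.g. on check([1], 2, 0): A returns true, B returns false
-- outside the precondition, e.g. on check([1], -1, 1): A returns True, B returns False; on check([1, 2], 0, 1): A raises ValueError, B raises ZeroDivisionError
import Mathlib
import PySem

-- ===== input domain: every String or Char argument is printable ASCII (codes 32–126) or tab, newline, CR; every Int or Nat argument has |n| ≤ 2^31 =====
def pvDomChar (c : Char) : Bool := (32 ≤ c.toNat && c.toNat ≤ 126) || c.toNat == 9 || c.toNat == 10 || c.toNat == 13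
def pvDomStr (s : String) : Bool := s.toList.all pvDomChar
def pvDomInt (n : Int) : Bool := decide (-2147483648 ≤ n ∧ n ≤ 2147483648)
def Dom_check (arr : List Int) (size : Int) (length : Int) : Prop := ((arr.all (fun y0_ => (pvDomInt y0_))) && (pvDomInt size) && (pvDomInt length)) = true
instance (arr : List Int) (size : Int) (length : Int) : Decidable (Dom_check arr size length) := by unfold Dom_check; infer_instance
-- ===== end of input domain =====

-- B builds the expected repetition arr[0:size]*(len(arr)//size) once and compares; on the
-- degenerate inputs of D_check below (no block fits) B returns False where A's empty loop says True.

-- ===== PORT A =====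
def check (arr : List Int) (size : Int) (length : Int) : Bool :=
  if size * length > (arr.length : Int) then false
  else
    let const := PySem.List.slice arr (some 0) (some size)
    (PySem.List.pyRange size (arr.length : Int) size).all
      (fun i => PySem.List.slice arr (some i) (some (i + size)) == const)

-- ===== PORT B =====
-- Python `xs * n`: n concatenated copies, empty for n ≤ 0 (Int.toNat clamps) — exact.
def pyListMul (xs : List Int) (n : Int) : List Int := (List.replicate n.toNat xs).flatten

def check_alt (arr : List Int) (size : Int) (length : Int) : Bool :=
  if size * length > (arr.length : Int) then false
  else arr == pyListMul (PySem.List.slice arr (some 0) (some size))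
                (PySem.Int.floordiv (arr.length : Int) size)

-- ===== PRECONDITION & SPEC =====
-- Pre_ restricts to the task's natural domain of positive block sizes — size = 0 makes A raise
-- ValueError (zero range step) and B raise ZeroDivisionError, and a negative size is outside the
-- pattern-detection domain (no block of negative length exists) — except that inputs rejected by
-- the initial guard and empty arrays (with size ≠ 0) are kept: both programs agree there.
def Pre_check (arr : List Int) (size : Int) (length : Int) : Prop :=
  1 ≤ size ∨ size * length > (arr.length : Int) ∨ (arr = [] ∧ size ≠ 0)
instance (arr : List Int) (size : Int) (length : Int) : Decidable (Pre_check arr size length) := by unfold Pre_check; infer_instance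
def pvWitness_check : List Int × Int × Int := ([1, 2, 1, 2], 2, 2)

-- On degenerate inputs where arr is nonempty, size*length ≤ len(arr) yet size > len(arr)
-- (possible only for length ≤ 0), A's loop runs zero times so A vacuously returns True, while B
-- returns False, the intended verdict since no block of size elements fits into arr.
def D_check (arr : List Int) (size : Int) (length : Int) : Prop :=
  arr ≠ [] ∧ size * length ≤ (arr.length : Int) ∧ (arr.length : Int) < size
instance (arr : List Int) (size : Int) (length : Int) : Decidable (D_check arr size length) := by unfold D_check; infer_instance

def Spec_check (arr : List Int) (size : Int) (length : Int) (out : Bool) : Prop := ¬ D_check arr size length → out = check_alt arr size length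
instance (arr : List Int) (size : Int) (length : Int) (out : Bool) : Decidable (Spec_check arr size length out) := by unfold Spec_check; infer_instance

def pvDiffWitness_check : List Int × Int × Int := ([1], 2, 0)
def pvDiffWitnessOut_check : Bool × Bool := (true, false)

-- ===== CLAIM (what is proved, stated in full; the proofs are below) =====
def Claim_unchanged_check : Prop := ∀ (arr : List Int) (size : Int) (length : Int), Dom_check arr size length → Pre_check arr size length → Spec_check arr size length (check arr size length)
def Claim_changed_check : Prop := Dom_check (pvDiffWitness_check.1) (pvDiffWitness_check.2.1) (pvDiffWitness_check.2.2) ∧ Pre_check (pvDiffWitness_check.1) (pvDiffWitness_check.2.1) (pvDiffWitness_check.2.2) ∧ D_check (pvDiffWitness_check.1) (pvDiffWitness_check.2.1) (pvDiffWitness_check.2.2) ∧ check (pvDiffWitness_check.1) (pvDiffWitness_check.2.1) (pvDiffWitness_check.2.2) = pvDiffWitnessOut_check.1 ∧ check_alt (pvDiffWitness_check.1) (pvDiffWitness_check.2.1) (pvDiffWitness_check.2.2) = pvDiffWitnessOut_check.2 ∧ pvDiffWitnessOut_check.1 ≠ pvDiffWitnessOut_check.2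
def Claim_exact_check : Prop := ∀ (arr : List Int) (size : Int) (length : Int), Dom_check arr size length → Pre_check arr size length → D_check arr size length → check arr size length ≠ check_alt arr size length

-- ===== LEMMAS AND PROOFS =====

-- range(a, b, s) is empty for a negative step s when a ≤ b
lemma pyRange_nil_of_neg {a b s : Int} (hs : s < 0) (h : a ≤ b) : PySem.List.pyRange a b s = [] := by
  simp only [PySem.List.pyRange]
  rw [if_neg (by omega : ¬ s = 0), if_neg (by omega : ¬ 0 < s), if_neg (by omega : ¬ b < a)]
  simp

-- range(a, b, s) is empty for a positive step s when b ≤ a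
lemma pyRange_nil_of_pos_le {a b s : Int} (hs : 0 < s) (h : b ≤ a) : PySem.List.pyRange a b s = [] := by
  simp only [PySem.List.pyRange]
  rw [if_neg (by omega : ¬ s = 0), if_pos hs, if_neg (by omega : ¬ a < b)]
  simp

-- core: for 0 < s, checking every s-block of arr against C (the block 0 test included,
-- trivially true when C = arr.take s) equals comparing arr with (len/s) concatenated copies of C
lemma blocks_eq (s : Nat) (hs : 0 < s) (C : List Int) (hC : C.length = s) :
    ∀ (n : Nat) (arr : List Int), arr.length = n →
    (((List.range ((n + s - 1) / s)).all fun k => ((arr.drop (k * s)).take s == C))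
      = (arr == (List.replicate (n / s) C).flatten)) := by
  intro n
  induction n using Nat.strong_induction_on with
  | _ n ih =>
    intro arr hlen
    rcases Nat.eq_zero_or_pos n with hn0 | hn1
    · subst hn0
      have harr : arr = [] := List.length_eq_zero_iff.mp hlen
      subst harr
      have h0 : (0 + s - 1) / s = 0 := Nat.div_eq_of_lt (by omega)
      have h0' : 0 / s = 0 := Nat.zero_div s
      rw [h0, h0']
      simp
    · by_cases hns : n < s
      · have h1 : (n + s - 1) / s = 1 := by
          have := Nat.div_eq_of_lt_le (by omega : 1 * s ≤ n + s - 1) (by omega : n + s - 1 < (1 + 1) * s)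
          omega
        have h2 : n / s = 0 := Nat.div_eq_of_lt hns
        have hne : arr.take s ≠ C := by
          intro h
          have := congrArg List.length h
          simp [hlen, hC] at this
          omega
        have harr : arr ≠ [] := by
          intro h; subst h; simp at hlen; omega
        rw [h1, h2]
        simp only [List.range_one, List.all_cons, List.all_nil, Bool.and_true, Nat.zero_mul,
          List.drop_zero, List.replicate_zero, List.flatten_nil]
        rw [beq_eq_false_iff_ne.mpr hne, beq_eq_false_iff_ne.mpr harr]
      · rw [Nat.not_lt] at hns
        have hm : (n + s - 1) / s = (n - 1) / s + 1 := by
          have h : n + s - 1 = (n - 1) + s := by omega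
          rw [h, Nat.add_div_right _ hs]
        have hq : n / s = (n - s) / s + 1 := by
          have h : n = (n - s) + s := by omega
          conv_lhs => rw [h]
          rw [Nat.add_div_right _ hs]
        have hm2 : (n - 1) / s = ((n - s) + s - 1) / s := by
          congr 1; omega
        rw [hm, hq, List.range_succ_eq_map, List.all_cons]
        simp only [Nat.zero_mul, List.drop_zero]
        have hdropQ : ∀ k : Nat, ((arr.drop (Nat.succ k * s)).take s == C)
            = (((arr.drop s).drop (k * s)).take s == C) := by
          intro k
          rw [List.drop_drop, Nat.succ_mul, Nat.add_comm (k * s) s]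
        by_cases hQ : arr.take s = C
        · have hQ' : (arr.take s == C) = true := by simp [hQ]
          rw [hQ', Bool.true_and, List.all_map]
          have hstep : (List.range ((n - 1) / s)).all ((fun k => ((arr.drop (k * s)).take s == C)) ∘ Nat.succ)
              = (List.range ((n - 1) / s)).all (fun k => (((arr.drop s).drop (k * s)).take s == C)) := by
            refine List.all_congr rfl (fun k => ?_)
            simp only [Function.comp_apply]
            exact hdropQ k
          rw [hstep, hm2, ih (n - s) (by omega) (arr.drop s) (by simp [hlen])]
          rw [List.replicate_succ, List.flatten_cons]
          apply Bool.eq_iff_iff.mpr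
          simp only [beq_iff_eq]
          constructor
          · intro h
            conv_lhs => rw [← List.take_append_drop s arr, hQ, h]
          · intro h
            rw [h, ← hC, List.drop_left]
        · have hQ' : (arr.take s == C) = false := by simp [hQ]
          rw [hQ', Bool.false_and]
          symm
          rw [List.replicate_succ, List.flatten_cons, beq_eq_false_iff_ne]
          intro h
          apply hQ
          rw [h, ← hC, List.take_left]

-- A's loop (which starts at index s) in the non-guard branch, for 0 < s ≤ len arr
lemma main_eq (arr : List Int) (s : Nat) (hs : 0 < s) (hle : s ≤ arr.length) :
    ((PySem.List.pyRange (s : Int) (arr.length : Int) (s : Int)).all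
        (fun i => PySem.List.slice arr (some i) (some (i + (s : Int))) == arr.take s))
      = (arr == (List.replicate (arr.length / s) (arr.take s)).flatten) := by
  set n := arr.length with hn
  have hC : (arr.take s).length = s := by simp; omega
  have hcast : 0 < (s : Int) := by exact_mod_cast hs
  rw [PySem.List.pyRange_of_pos _ _ hcast, List.all_map]
  -- the count equals (n-1)/s
  have hcnt : (if (s : Int) < (n : Int) then (((n : Int) - s + s - 1) / s).toNat else 0) = (n - 1) / s := by
    by_cases h : (s : Int) < (n : Int)
    · rw [if_pos h]
      have h1 : (n : Int) - s + s - 1 = ((n - 1 : Nat) : Int) := by omega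
      rw [h1]
      exact Nat.add_zero _
    · rw [if_neg h]
      have : n = s := by omega
      rw [this]
      symm
      exact Nat.div_eq_of_lt (by omega)
  rw [hcnt]
  -- each body equals the (k+1)-th block test
  have hbody : ∀ k : Nat,
      (PySem.List.slice arr (some ((s : Int) + (s : Int) * (k : Int)))
          (some ((s : Int) + (s : Int) * (k : Int) + (s : Int))) == arr.take s)
      = ((arr.drop (Nat.succ k * s)).take s == arr.take s) := by
    intro k
    have hj : (s : Int) + (s : Int) * (k : Int) = ((Nat.succ k * s : Nat) : Int) := by
      push_cast; ring
    rw [hj, PySem.List.slice_natCast_add arr (Nat.succ k * s) s]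
  -- fold into blocks_eq
  have hb := blocks_eq s hs (arr.take s) hC n arr hn.symm
  have hm : (n + s - 1) / s = (n - 1) / s + 1 := by
    have h : n + s - 1 = (n - 1) + s := by omega
    rw [h, Nat.add_div_right _ hs]
  rw [hm, List.range_succ_eq_map, List.all_cons] at hb
  simp only [Nat.zero_mul, List.drop_zero, beq_self_eq_true, Bool.true_and, List.all_map] at hb
  rw [← hb]
  refine List.all_congr rfl (fun k => ?_)
  simp only [Function.comp_apply]
  rw [hbody k]

-- A = B outside D_ (given size ≠ 0)
theorem check_spec_core (arr : List Int) (size : Int) (length : Int)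
    (hpre : Pre_check arr size length) (hnd : ¬ D_check arr size length) :
    check arr size length = check_alt arr size length := by
  unfold check check_alt pyListMul
  by_cases hg : size * length > (arr.length : Int)
  · rw [if_pos hg, if_pos hg]
  · rw [if_neg hg, if_neg hg]
    rcases eq_or_ne arr [] with harr | harr
    · subst harr
      have hsz0 : size ≠ 0 := by
        rcases hpre with h | h | h
        · omega
        · exact absurd h hg
        · exact h.2
      have hrange : PySem.List.pyRange size ((List.length ([] : List Int)) : Int) size = [] := by
        rcases lt_or_gt_of_ne hsz0 with h | h
        · exact pyRange_nil_of_neg h (by simp; omega)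
        · exact pyRange_nil_of_pos_le h (by simp; omega)
      rw [hrange]
      simp [PySem.List.slice]
    · have hlen1 : 0 < arr.length := List.length_pos_iff.mpr harr
      have hcase : ¬ ((arr.length : Int) < size) := by
        intro hc
        exact hnd ⟨harr, not_lt.mp hg, hc⟩
      have hpos : 0 < size := by
        rcases hpre with h | h | h
        · omega
        · exact absurd h hg
        · exact absurd h.1 harr
      have hle : size ≤ (arr.length : Int) := by omega
      set s := size.toNat with hsdef
      have hsz : size = (s : Int) := (Int.toNat_of_nonneg (by omega)).symm
      have hs : 0 < s := by omega
      have hsle : s ≤ arr.length := by omega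
      rw [hsz]
      have hconst : PySem.List.slice arr (some 0) (some (s : Int)) = arr.take s := by
        rw [PySem.List.slice_zero_start, PySem.List.slice_to_natCast]
      rw [hconst]
      rw [show PySem.Int.floordiv ((arr.length : Nat) : Int) ((s : Nat) : Int)
            = ((arr.length / s : Nat) : Int) from PySem.Int.floordiv_natCast _ _]
      rw [Int.toNat_natCast]
      exact main_eq arr s hs hsle

theorem check_tight_core (arr : List Int) (size : Int) (length : Int)
    (hd : D_check arr size length) :
    check arr size length ≠ check_alt arr size length := by
  obtain ⟨hne, hgle, hbig⟩ := hd
  have hlen1 : 0 < arr.length := List.length_pos_iff.mpr hne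
  have hg : ¬ (size * length > (arr.length : Int)) := not_lt.mpr hgle
  have hA : check arr size length = true := by
    unfold check
    rw [if_neg hg]
    have hrange : PySem.List.pyRange size ((arr.length : Nat) : Int) size = [] :=
      pyRange_nil_of_pos_le (by omega) (le_of_lt hbig)
    rw [hrange]
    rfl
  have hB : check_alt arr size length = false := by
    unfold check_alt pyListMul
    rw [if_neg hg]
    have hq : (PySem.Int.floordiv ((arr.length : Nat) : Int) size).toNat = 0 := by
      rw [PySem.Int.floordiv_eq_ediv_of_pos (by omega)]
      rw [Int.ediv_eq_zero_of_lt (by omega) hbig]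
      rfl
    rw [hq]
    simp [hne]
  rw [hA, hB]
  simp

-- ===== VERDICT (by name: the statement is the Claim_ definition above) =====
theorem check_spec : Claim_unchanged_check := by
  intro arr size length _ hpre
  unfold Spec_check
  intro hnd
  exact check_spec_core arr size length hpre hnd

theorem check_changed : Claim_changed_check := by unfold Claim_changed_check; decide

theorem check_tight : Claim_exact_check := by
  intro arr size length _ _ hd
  exact check_tight_core arr size length hd
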